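-- pv_equiv track=rewrite | github.com/Black-Zeus/iTopHUB | APP/volumes/backend/app/modules/teams/service.py | _matches_team_query
-- ===== SOURCE A (Python) =====
-- def _matches_team_query(item, query: str) -> bool:
--     tokens = [token.casefold() for token in query.split() if token]
--     if not tokens:
--         return True
--
--     haystack = " ".join(
--         [
--             str(item.get("friendlyname") or ""),
--             str(item.get("name") or ""),
--             str(item.get("email") or ""),
--             str(item.get("function") or ""),
--             str(item.get("org_id_friendlyname") or ""),
--         ]
--     ).casefold()
--     return all(token in haystack for token in tokens)
-- ===== SOURCE B (Python) =====
-- _TEAM_QUERY_FIELDS = ("friendlyname", "name", "email", "function", "org_id_friendlyname")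
--
--
-- def _matches_team_query(item, query: str) -> bool:
--     tokens = [token.casefold() for token in query.split() if token]
--     if not tokens:
--         return True
--
--     fields = [str(item.get(key) or "").casefold() for key in _TEAM_QUERY_FIELDS]
--     return all(any(token in field for field in fields) for token in tokens)
-- ===== Notes on version B (the rewrite author's own statement) =====
-- stated objective: alternative
-- what changed: B drops the space-joined concatenated haystack and instead checks each casefolded field separately, returning all(any(token in field)); correct because split() tokens contain no whitespace and so cannot match across the join boundary.
import Mathlib
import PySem

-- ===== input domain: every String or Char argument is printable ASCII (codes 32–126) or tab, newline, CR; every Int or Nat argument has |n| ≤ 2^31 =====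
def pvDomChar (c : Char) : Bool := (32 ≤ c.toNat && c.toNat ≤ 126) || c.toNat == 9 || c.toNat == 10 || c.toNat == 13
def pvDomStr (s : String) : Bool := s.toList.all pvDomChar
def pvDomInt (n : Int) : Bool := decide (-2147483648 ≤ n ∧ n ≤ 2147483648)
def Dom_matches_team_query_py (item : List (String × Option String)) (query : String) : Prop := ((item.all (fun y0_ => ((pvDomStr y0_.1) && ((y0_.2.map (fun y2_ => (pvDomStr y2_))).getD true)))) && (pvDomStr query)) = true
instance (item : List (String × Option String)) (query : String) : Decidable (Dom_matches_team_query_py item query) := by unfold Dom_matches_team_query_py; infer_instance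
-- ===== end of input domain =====

-- B checks each casefolded field separately (all/any over the five fields) instead of one
-- space-joined haystack; equal because split() tokens contain no whitespace (objective: alternative).


-- ===== PORT A =====
-- str(item.get(k) or ""): missing key or None or "" gives ""; otherwise the stored string
def pvField (item : List (String × Option String)) (k : String) : String :=
  match PySem.Dict.get? (PySem.Dict.mk item) k with
  | some (some s) => if s == "" then "" else s
  | _ => ""

def matches_team_query_py (item : List (String × Option String)) (query : String) : Bool :=
  let tokens := ((PySem.Str.split₀ query).filter (fun t => !(t == ""))).map PySem.Str.lower
  if tokens.isEmpty then true
  else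
    let haystack := PySem.Str.lower (PySem.Str.join " "
      [ pvField item "friendlyname",
        pvField item "name",
        pvField item "email",
        pvField item "function",
        pvField item "org_id_friendlyname" ])
    tokens.all (fun t => PySem.Str.isIn t haystack)

-- ===== PORT B =====
def pvTeamQueryFields : List String :=
  ["friendlyname", "name", "email", "function", "org_id_friendlyname"]

def matches_team_query_py_alt (item : List (String × Option String)) (query : String) : Bool :=
  let tokens := ((PySem.Str.split₀ query).filter (fun t => !(t == ""))).map PySem.Str.lower
  if tokens.isEmpty then true
  else
    let fields := pvTeamQueryFields.map (fun k => PySem.Str.lower (pvField item k))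
    tokens.all (fun t => fields.any (fun f => PySem.Str.isIn t f))

-- ===== PRECONDITION & SPEC =====
def Spec_matches_team_query_py (item : List (String × Option String)) (query : String) (out : Bool) : Prop := out = matches_team_query_py_alt item query
instance (item : List (String × Option String)) (query : String) (out : Bool) : Decidable (Spec_matches_team_query_py item query out) := by unfold Spec_matches_team_query_py; infer_instance

-- ===== CLAIM (what is proved, stated in full; the proofs are below) =====
def Claim_equal_matches_team_query_py : Prop := ∀ (item : List (String × Option String)) (query : String), Dom_matches_team_query_py item query → Spec_matches_team_query_py item query (matches_team_query_py item query)

-- ===== LEMMAS AND PROOFS =====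

-- a space-free pattern that is a prefix of a ++ ' ' :: b is a prefix of a
theorem pv_prefix_append_space (t a b : List Char) (hs : ' ' ∉ t)
    (h : t <+: a ++ ' ' :: b) : t <+: a := by
  by_cases hl : t.length ≤ a.length
  · obtain ⟨r, hr⟩ := h
    have ht : t = (a ++ ' ' :: b).take t.length := by
      rw [← hr, List.take_left]
    rw [List.take_append_of_le_length hl] at ht
    rw [ht]; exact List.take_prefix _ _
  · exfalso
    rw [not_le] at hl
    obtain ⟨r, hr⟩ := h
    have h1 : a.length < (t ++ r).length := by
      simp only [List.length_append]; omega
    have h2 : (t ++ r)[a.length]'h1 = t[a.length]'hl := List.getElem_append_left hl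
    have h4 : a.length < (a ++ ' ' :: b).length := by
      simp only [List.length_append, List.length_cons]; omega
    have h3 : (t ++ r)[a.length]'h1 = ' ' := by
      calc (t ++ r)[a.length]'h1 = (a ++ ' ' :: b)[a.length]'h4 := by congr 1
        _ = ' ' := by rw [List.getElem_append_right (le_refl a.length)]; simp
    have h5 : t[a.length]'hl = ' ' := by rw [← h2, h3]
    exact hs (h5 ▸ List.getElem_mem hl)

-- a nonempty space-free pattern is a substring of a ++ ' ' :: b iff it is one of a or of b
theorem pv_infix_append_space (t a b : List Char) (ht : t ≠ []) (hs : ' ' ∉ t) :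
    t <:+: a ++ ' ' :: b ↔ t <:+: a ∨ t <:+: b := by
  induction a with
  | nil =>
    simp only [List.nil_append, List.infix_cons_iff]
    constructor
    · rintro (hp | hi)
      · exact absurd (List.prefix_nil.mp (pv_prefix_append_space t [] b hs (by simpa using hp)))
          ht
      · exact Or.inr hi
    · rintro (hi | hi)
      · exact absurd (List.eq_nil_of_infix_nil hi) ht
      · exact Or.inr hi
  | cons c a' ih =>
    have hpe : t <+: c :: (a' ++ ' ' :: b) ↔ t <+: c :: a' := by
      constructor
      · intro hp
        exact pv_prefix_append_space t (c :: a') b hs (by simpa using hp)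
      · intro hp
        have := hp.trans (List.prefix_append (c :: a') (' ' :: b))
        simpa using this
    rw [List.cons_append, List.infix_cons_iff, ih, List.infix_cons_iff, hpe]
    tauto

-- every token produced by split() is nonempty and contains no whitespace character
theorem pv_split₀_go_mem (s : List Char) :
    ∀ (cur : List Char) (acc : List (List Char)),
      (∀ c ∈ cur, PySem.Chars.isspace c = false) →
      (∀ l ∈ acc, l ≠ [] ∧ ∀ c ∈ l, PySem.Chars.isspace c = false) →
      ∀ t ∈ PySem.Chars.split₀.go s cur acc, t ≠ [] ∧ ∀ c ∈ t, PySem.Chars.isspace c = false := by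
  induction s with
  | nil =>
    intro cur acc hcur hacc t htmem
    simp only [PySem.Chars.split₀.go] at htmem
    split at htmem
    · exact hacc t (List.mem_reverse.mp htmem)
    · rcases List.mem_cons.mp (List.mem_reverse.mp htmem) with h | h
      · subst h
        rename_i hne
        constructor
        · simp only [ne_eq, List.reverse_eq_nil_iff]
          intro hcn
          exact hne (by simp [hcn])
        · intro c hc
          exact hcur c (List.mem_reverse.mp hc)
      · exact hacc t h
  | cons c rest ih =>
    intro cur acc hcur hacc t htmem
    simp only [PySem.Chars.split₀.go] at htmem
    split at htmem
    · split at htmem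
      · exact ih [] acc (by simp) hacc t htmem
      · refine ih [] (cur.reverse :: acc) (by simp) ?_ t htmem
        intro l hl
        rcases List.mem_cons.mp hl with h | h
        · subst h
          rename_i hne
          constructor
          · simp only [ne_eq, List.reverse_eq_nil_iff]
            intro hcn
            exact hne (by simp [hcn])
          · intro d hd
            exact hcur d (List.mem_reverse.mp hd)
        · exact hacc l h
    · refine ih (c :: cur) acc ?_ hacc t htmem
      intro d hd
      rcases List.mem_cons.mp hd with h | h
      · rename_i hsp; subst h; simpa using hsp
      · exact hcur d h

theorem pv_split₀_tokens (s : List Char) :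
    ∀ t ∈ PySem.Chars.split₀ s, t ≠ [] ∧ ∀ c ∈ t, PySem.Chars.isspace c = false := by
  intro t ht
  exact pv_split₀_go_mem s [] [] (by simp) (by simp) t ht

theorem pv_lowerChar_ne_space (c : Char) (h : PySem.Chars.isspace c = false) :
    PySem.Chars.lowerChar c ≠ ' ' := by
  unfold PySem.Chars.lowerChar
  split
  · rename_i hu
    intro he
    have hb : ('A' ≤ c ∧ c ≤ 'Z') := by simpa [PySem.Chars.isupper] using hu
    have h65 : 65 ≤ c.toNat := hb.1
    have h90 : c.toNat ≤ 90 := hb.2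
    have hv : c.toNat + 32 < 55296 := by omega
    have hval : (c.toNat + 32).isValidChar := Or.inl (by omega)
    have hn : (Char.ofNat (c.toNat + 32)).toNat = c.toNat + 32 := by
      unfold Char.ofNat
      rw [dif_pos hval]
      simp [Char.ofNatAux]
      omega
    have h32 : (' ' : Char).toNat = 32 := by decide
    rw [he, h32] at hn
    omega
  · intro he
    rw [he] at h
    simp [PySem.Chars.isspace] at h

-- the per-token equivalence: substring of the joined haystack iff substring of some field
theorem pv_isIn_join (t l1 l2 l3 l4 l5 : List Char) (ht : t ≠ []) (hs : ' ' ∉ t) :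
    PySem.Chars.isIn t (l1 ++ ' ' :: (l2 ++ ' ' :: (l3 ++ ' ' :: (l4 ++ ' ' :: l5)))) =
      (PySem.Chars.isIn t l1 || PySem.Chars.isIn t l2 || PySem.Chars.isIn t l3 ||
        PySem.Chars.isIn t l4 || PySem.Chars.isIn t l5) := by
  rcases h : PySem.Chars.isIn t (l1 ++ ' ' :: (l2 ++ ' ' :: (l3 ++ ' ' :: (l4 ++ ' ' :: l5)))) with _ | _
  · have hni := (PySem.Chars.isIn_eq_false_iff _ _).mp h
    symm
    simp only [Bool.or_eq_false_iff]
    refine ⟨⟨⟨⟨?_, ?_⟩, ?_⟩, ?_⟩, ?_⟩ <;>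
      · apply (PySem.Chars.isIn_eq_false_iff _ _).mpr
        intro hin
        apply hni
        simp only [pv_infix_append_space t _ _ ht hs]
        tauto
  · have hi := (PySem.Chars.isIn_iff_infix _ _).mp h
    simp only [pv_infix_append_space t _ _ ht hs] at hi
    symm
    simp only [Bool.or_eq_true, PySem.Chars.isIn_iff_infix]
    tauto

theorem pv_all_congr_mem {α : Type} (l : List α) (p q : α → Bool)
    (h : ∀ x ∈ l, p x = q x) : l.all p = l.all q := by
  induction l with
  | nil => rfl
  | cons x xs ih =>
    simp only [List.all_cons]
    rw [h x (by simp), ih (fun y hy => h y (by simp [hy]))]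

theorem pv_tokens_ok (query : String) :
    ∀ t ∈ ((PySem.Str.split₀ query).filter (fun t => !(t == ""))).map PySem.Str.lower,
      t.toList ≠ [] ∧ ' ' ∉ t.toList := by
  intro t ht
  rw [List.mem_map] at ht
  obtain ⟨tok, htok, rfl⟩ := ht
  rw [List.mem_filter] at htok
  have hmem : tok.toList ∈ PySem.Chars.split₀ query.toList := by
    rw [← PySem.Str.split₀_map_toList]
    exact List.mem_map_of_mem htok.1
  obtain ⟨hne, hsp⟩ := pv_split₀_tokens query.toList tok.toList hmem
  rw [PySem.Str.toList_lower]
  constructor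
  · simpa [PySem.Chars.lower] using hne
  · intro hin
    simp only [PySem.Chars.lower, List.mem_map] at hin
    obtain ⟨c, hc, hlc⟩ := hin
    exact pv_lowerChar_ne_space c (hsp c hc) hlc

-- ===== VERDICT (by name: the statement is the Claim_ definition above) =====
theorem matches_team_query_py_spec : Claim_equal_matches_team_query_py := by
  intro item query _
  unfold Spec_matches_team_query_py
  simp only [matches_team_query_py, matches_team_query_py_alt]
  by_cases he :
      (((PySem.Str.split₀ query).filter (fun t => !(t == ""))).map PySem.Str.lower).isEmpty
  · simp [he]
  · simp only [he, Bool.false_eq_true, if_false]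
    apply pv_all_congr_mem
    intro t ht
    obtain ⟨htne, hts⟩ := pv_tokens_ok query t ht
    simp only [pvTeamQueryFields, List.map_cons, List.map_nil, List.any_cons, List.any_nil,
      Bool.or_false]
    rw [PySem.Str.isIn_eq]
    have hhs : (PySem.Str.lower (PySem.Str.join " "
        [ pvField item "friendlyname",
          pvField item "name",
          pvField item "email",
          pvField item "function",
          pvField item "org_id_friendlyname" ])).toList =
        PySem.Chars.lower (pvField item "friendlyname").toList ++ ' ' ::
        (PySem.Chars.lower (pvField item "name").toList ++ ' ' ::
        (PySem.Chars.lower (pvField item "email").toList ++ ' ' ::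
        (PySem.Chars.lower (pvField item "function").toList ++ ' ' ::
        PySem.Chars.lower (pvField item "org_id_friendlyname").toList))) := by
      rw [PySem.Str.toList_lower]
      simp [PySem.Str.join, PySem.Chars.join, List.intercalate, List.intersperse,
        PySem.Chars.lower, PySem.Chars.lowerChar, PySem.Chars.isupper]
    rw [hhs]
    rw [pv_isIn_join _ _ _ _ _ _ htne hts]
    simp only [PySem.Str.isIn_eq, PySem.Str.toList_lower, Bool.or_assoc]
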